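-- pv_equiv track=rewrite | github.com/TamProVip/Sources-AOV-Tool | checkicon.py | textDump
-- ===== SOURCE A (Python) =====
-- def textDump(raw, max_lines=10):
--     output = ""
--     line_count = 0
--     for i, byte in enumerate(raw):
--         if i % 64 == 0:
--             if line_count >= max_lines:
--                 output += "\n[...]"
--                 break
--             if i > 0:
--                 output += "\n"
--             line_count += 1
--         output += chr(byte) if 32 <= byte <= 126 else '.'
--     return output
-- ===== SOURCE B (Python) =====
-- def textDump(raw, max_lines=10):
--     chunks = [raw[i:i + 64] for i in range(0, len(raw), 64)]
--     lines = [''.join(chr(b) if 32 <= b <= 126 else '.' for b in c) for c in chunks]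
--     m = max(max_lines, 0)
--     out = '\n'.join(lines[:m])
--     return out + '\n[...]' if len(chunks) > m else out
-- ===== Notes on version B (the rewrite author's own statement) =====
-- stated objective: alternative
-- what changed: Replaces the single byte-by-byte loop with stateful index/line-count bookkeeping by a chunk-based decomposition: split into 64-byte chunks, render each chunk to a line, take the first max(max_lines,0) lines, join with newlines, and append '\n[...]' iff there are more chunks than the budget.
import Mathlib
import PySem

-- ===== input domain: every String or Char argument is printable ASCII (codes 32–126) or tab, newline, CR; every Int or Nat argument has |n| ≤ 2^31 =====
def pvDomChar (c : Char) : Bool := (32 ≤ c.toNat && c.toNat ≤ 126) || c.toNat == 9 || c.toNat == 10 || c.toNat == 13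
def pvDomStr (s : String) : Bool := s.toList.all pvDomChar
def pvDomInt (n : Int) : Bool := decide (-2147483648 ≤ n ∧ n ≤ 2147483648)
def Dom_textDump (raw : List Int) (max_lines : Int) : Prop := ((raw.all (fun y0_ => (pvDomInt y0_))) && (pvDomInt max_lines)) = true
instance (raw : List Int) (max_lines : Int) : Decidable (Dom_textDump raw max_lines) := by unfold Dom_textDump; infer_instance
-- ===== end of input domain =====

-- B replaces A's byte-by-byte loop (index/line-count bookkeeping and break) by a chunk
-- decomposition: split into 64-byte chunks, render each to a line, take the first
-- max(max_lines,0) lines joined by newlines, append "\n[...]" iff more chunks remain.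

-- ===== PORT A =====
-- chr(byte) if 32 <= byte <= 126 else '.'
def pvChr (b : Int) : String :=
  if 32 ≤ b ∧ b ≤ 126 then String.singleton (Char.ofNat b.toNat) else "."

-- the 'for i, byte in enumerate(raw)' loop with its break, as structural recursion
def textDumpLoop (xs : List Int) (i : Nat) (output : String) (line_count : Int)
    (max_lines : Int) : String :=
  match xs with
  | [] => output
  | b :: rest =>
    if i % 64 = 0 then
      if line_count ≥ max_lines then output ++ "\n[...]"
      else
        let output := if i > 0 then output ++ "\n" else output
        textDumpLoop rest (i + 1) (output ++ pvChr b) (line_count + 1) max_lines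
    else
      textDumpLoop rest (i + 1) (output ++ pvChr b) line_count max_lines

def textDump (raw : List Int) (max_lines : Int) : String :=
  textDumpLoop raw 0 "" 0 max_lines

-- ===== PORT B =====
-- ''.join(chr(b) if 32 <= b <= 126 else '.' for b in c)
def pvLine (c : List Int) : String := String.join (c.map pvChr)

def textDump_alt (raw : List Int) (max_lines : Int) : String :=
  -- [raw[i:i+64] for i in range(0, len(raw), 64)]
  let chunks := (PySem.List.pyRange 0 (raw.length : Int) 64).map
    (fun i => PySem.List.slice raw (some i) (some (i + 64)))
  let lines := chunks.map pvLine
  let m := max max_lines 0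
  let out := PySem.Str.join "\n" (lines.take m.toNat)   -- '\n'.join(lines[:m]), m ≥ 0
  if (chunks.length : Int) > m then out ++ "\n[...]" else out

-- ===== PRECONDITION & SPEC =====
def Spec_textDump (raw : List Int) (max_lines : Int) (out : String) : Prop := out = textDump_alt raw max_lines
instance (raw : List Int) (max_lines : Int) (out : String) : Decidable (Spec_textDump raw max_lines out) := by unfold Spec_textDump; infer_instance

-- ===== CLAIM (what is proved, stated in full; the proofs are below) =====
def Claim_equal_textDump : Prop := ∀ (raw : List Int) (max_lines : Int), Dom_textDump raw max_lines → Spec_textDump raw max_lines (textDump raw max_lines)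

-- ===== LEMMAS AND PROOFS =====

-- proof-side chunk list: pvChunks raw = the 64-byte chunks of raw, front to back
def pvChunks (raw : List Int) : List (List Int) :=
  if raw = [] then []
  else raw.take 64 :: pvChunks (raw.drop 64)
termination_by raw.length
decreasing_by
  simp only [List.length_drop]
  rename_i h
  have : raw.length ≠ 0 := by simpa [List.length_eq_zero_iff] using h
  omega

theorem pvChunks_cons (b : Int) (rest : List Int) :
    pvChunks (b :: rest) = (b :: rest).take 64 :: pvChunks ((b :: rest).drop 64) := by
  rw [pvChunks]; simp

theorem pyRange64_nil (b : Int) (hb : b ≤ 0) : PySem.List.pyRange 0 b 64 = [] := by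
  rw [PySem.List.pyRange_of_pos _ _ (by norm_num)]
  rw [if_neg (by omega)]
  simp

theorem pyRange64_cons (b : Int) (hb : 0 < b) :
    PySem.List.pyRange 0 b 64 = 0 :: (PySem.List.pyRange 0 (b - 64) 64).map (fun k => 64 + k) := by
  rw [PySem.List.pyRange_of_pos _ _ (by norm_num), PySem.List.pyRange_of_pos _ _ (by norm_num)]
  by_cases h64 : 64 < b
  · rw [if_pos hb, if_pos (by omega)]
    have hN : ((b - 0 + 64 - 1) / 64).toNat = ((b - 64 - 0 + 64 - 1) / 64).toNat + 1 := by omega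
    rw [hN, List.range_succ_eq_map]
    simp only [List.map_cons, List.map_map]
    refine List.cons_eq_cons.mpr ⟨by norm_num, ?_⟩
    apply List.map_congr_left
    intro k _
    simp only [Function.comp_apply]
    omega
  · rw [if_pos hb, if_neg (by omega)]
    have hN : ((b - 0 + 64 - 1) / 64).toNat = 1 := by omega
    rw [hN]
    simp [List.range_succ]

-- B's chunk comprehension computes pvChunks
theorem chunks_eq_aux :
    ∀ n (raw : List Int), raw.length ≤ n →
      (PySem.List.pyRange 0 (raw.length : Int) 64).map
        (fun i => PySem.List.slice raw (some i) (some (i + 64))) = pvChunks raw := by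
  intro n
  induction n with
  | zero =>
    intro raw hr
    have : raw = [] := by
      cases raw with
      | nil => rfl
      | cons a t => simp at hr
    subst this
    rw [pvChunks]
    simp [pyRange64_nil 0 (by omega)]
  | succ n ih =>
    intro raw hr
    cases raw with
    | nil =>
      rw [pvChunks]
      simp [pyRange64_nil 0 (by omega)]
    | cons b rest =>
      have hlen : (0 : Int) < ((b :: rest).length : Int) := by
        simp only [List.length_cons]; push_cast; omega
      rw [pyRange64_cons _ hlen, pvChunks_cons, List.map_cons, List.map_map]
      refine List.cons_eq_cons.mpr ⟨?_, ?_⟩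
      · show PySem.List.slice (b :: rest) (some 0) (some (0 + 64)) = (b :: rest).take 64
        rw [show ((0 : Int) + 64) = ((64 : Nat) : Int) by norm_num]
        rw [PySem.List.slice_zero_start, PySem.List.slice_to_natCast]
      · by_cases hb64 : (b :: rest).length ≤ 64
        · have h1 : ((b :: rest).length : Int) - 64 ≤ 0 := by omega
          rw [pyRange64_nil _ h1]
          have h2 : (b :: rest).drop 64 = [] := List.drop_eq_nil_iff.mpr hb64
          rw [h2, pvChunks]
          simp
        · have hlen2 : ((b :: rest).drop 64).length ≤ n := by
            have h3 : (b :: rest).length = rest.length + 1 := List.length_cons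
            rw [List.length_drop, h3]
            rw [h3] at hr
            omega
          rw [← ih ((b :: rest).drop 64) hlen2]
          have hcast : ((((b :: rest).drop 64).length : Nat) : Int) = ((b :: rest).length : Int) - 64 := by
            simp only [List.length_drop]
            push_cast [Nat.cast_sub (by omega : 64 ≤ (b :: rest).length)]
            ring
          rw [hcast]
          apply List.map_congr_left
          intro k hk
          have hk0 : 0 ≤ k := ((PySem.List.mem_pyRange_iff_of_pos (by norm_num) k).mp hk).1
          obtain ⟨kn, rfl⟩ : ∃ kn : Nat, k = (kn : Int) := ⟨k.toNat, (Int.toNat_of_nonneg hk0).symm⟩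
          simp only [Function.comp_apply]
          rw [show (64 + (kn : Int)) = (((64 + kn : Nat)) : Int) by push_cast; ring]
          rw [show ((((64 + kn : Nat)) : Int) + 64) = (((64 + kn : Nat)) : Int) + ((64 : Nat) : Int) by norm_num]
          rw [show ((kn : Int) + 64) = ((kn : Int) + ((64 : Nat) : Int)) by norm_num]
          rw [PySem.List.slice_natCast_add, PySem.List.slice_natCast_add]
          rw [List.drop_drop]

theorem chunks_eq (raw : List Int) :
    (PySem.List.pyRange 0 (raw.length : Int) 64).map
      (fun i => PySem.List.slice raw (some i) (some (i + 64))) = pvChunks raw :=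
  chunks_eq_aux raw.length raw (le_refl _)

theorem strJoin_nil : String.join ([] : List String) = "" := rfl

theorem strFoldl_append (a : String) (l : List String) :
    List.foldl (fun r s => r ++ s) a l = a ++ List.foldl (fun r s => r ++ s) "" l := by
  induction l generalizing a with
  | nil => simp
  | cons b t ih =>
    simp only [List.foldl_cons]
    rw [ih (a ++ b), ih ("" ++ b)]
    simp [String.append_assoc]

theorem strJoin_cons (s : String) (l : List String) :
    String.join (s :: l) = s ++ String.join l := by
  simp only [String.join, List.foldl_cons]
  rw [strFoldl_append]
  simp

theorem pyjoin_nil : PySem.Str.join "\n" ([] : List String) = "" := by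
  simp [PySem.Str.join]

theorem pyjoin_singleton (x : String) : PySem.Str.join "\n" [x] = x := by
  simp [PySem.Str.join]

theorem pyjoin_cons_cons (x b : String) (t : List String) :
    PySem.Str.join "\n" (x :: b :: t) = x ++ "\n" ++ PySem.Str.join "\n" (b :: t) := by
  simp only [PySem.Str.join, List.map_cons, PySem.Chars.join_cons_cons, List.append_assoc]
  rw [String.ofList_append, String.ofList_append, String.ofList_toList, String.ofList_toList]
  simp [String.append_assoc]

-- '\n'.join(x :: l) = x followed by every further line "\n"-prefixed
theorem pyjoin_cons (x : String) (l : List String) :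
    PySem.Str.join "\n" (x :: l) = x ++ String.join (l.map (fun s => "\n" ++ s)) := by
  induction l generalizing x with
  | nil => rw [pyjoin_singleton]; simp [strJoin_nil]
  | cons b t ih =>
    rw [pyjoin_cons_cons, ih b]
    simp only [List.map_cons]
    rw [strJoin_cons]
    simp [String.append_assoc]

-- A's loop from a chunk boundary onwards, with the first-line newline already owed
def loopC (ys : List Int) (o : String) (lc ml : Int) : String :=
  if ys = [] then o
  else if lc ≥ ml then o ++ "\n[...]"
  else loopC (ys.drop 64) (o ++ "\n" ++ pvLine (ys.take 64)) (lc + 1) ml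
termination_by ys.length
decreasing_by
  simp only [List.length_drop]
  rename_i h _
  have : ys.length ≠ 0 := by simpa [List.length_eq_zero_iff] using h
  omega

-- rendering of the remaining chunks with remaining budget k, every line "\n"-prefixed
def tailRender (ys : List Int) (k : Int) : String :=
  let cs := pvChunks ys
  String.join ((cs.take k.toNat).map (fun c => "\n" ++ pvLine c)) ++
    (if (cs.length : Int) > max k 0 then "\n[...]" else "")

theorem pvLine_nil : pvLine [] = "" := rfl

theorem pvLine_cons (b : Int) (c : List Int) : pvLine (b :: c) = pvChr b ++ pvLine c := by
  simp only [pvLine, List.map_cons]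
  exact strJoin_cons _ _

theorem tailRender_nil (k : Int) : tailRender [] k = "" := by
  rw [tailRender, pvChunks]
  simp [strJoin_nil]

theorem tailRender_trunc (b : Int) (rest : List Int) (k : Int) (hk : k ≤ 0) :
    tailRender (b :: rest) k = "\n[...]" := by
  rw [tailRender, pvChunks_cons]
  have h0 : k.toNat = 0 := by omega
  have hm : max k 0 = 0 := by omega
  have hgt : ((((b :: rest).take 64 :: pvChunks ((b :: rest).drop 64)).length : Int) > max k 0) := by
    rw [hm]; simp only [List.length_cons]; push_cast; omega
  simp only [h0, List.take_zero, List.map_nil, strJoin_nil, hgt, if_true]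
  simp

theorem tailRender_step (b : Int) (rest : List Int) (k : Int) (hk : 1 ≤ k) :
    tailRender (b :: rest) k
      = "\n" ++ pvLine ((b :: rest).take 64) ++ tailRender ((b :: rest).drop 64) (k - 1) := by
  rw [tailRender, tailRender, pvChunks_cons]
  have hkt : k.toNat = (k - 1).toNat + 1 := by omega
  rw [hkt]
  simp only [List.take_succ_cons, List.map_cons, List.length_cons]
  rw [strJoin_cons]
  have hmm : max (k - 1) 0 = k - 1 := by omega
  by_cases hc : (((pvChunks ((b :: rest).drop 64)).length : Int) > max (k - 1) 0)
  · have hc' : ((((pvChunks ((b :: rest).drop 64)).length + 1 : Nat) : Int) > max k 0) := by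
      rw [hmm] at hc; push_cast; omega
    simp only [hc, if_true, hc']
    simp [String.append_assoc]
  · have hc' : ¬ ((((pvChunks ((b :: rest).drop 64)).length + 1 : Nat) : Int) > max k 0) := by
      rw [hmm] at hc; push_cast; omega
    simp only [hc, if_false, hc']
    simp [String.append_assoc]

-- B on the empty input
theorem alt_nil (ml : Int) : textDump_alt [] ml = "" := by
  rw [textDump_alt, chunks_eq, pvChunks]
  simp [pyjoin_nil]

-- B when the budget is exhausted immediately
theorem alt_trunc (b : Int) (rest : List Int) (ml : Int) (hml : ml ≤ 0) :
    textDump_alt (b :: rest) ml = "\n[...]" := by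
  rw [textDump_alt, chunks_eq]
  simp only [pvChunks_cons]
  have hm : (max ml 0) = 0 := by omega
  have hgt : ((((b :: rest).take 64 :: pvChunks ((b :: rest).drop 64)).length : Int) > (0 : Int)) := by
    simp only [List.length_cons]; push_cast; omega
  rw [hm]
  simp only [Int.toNat_zero, List.take_zero, pyjoin_nil, hgt, if_true]
  simp

-- B with a positive budget: first line plus the "\n"-prefixed rendering of the rest
theorem alt_step (b : Int) (rest : List Int) (ml : Int) (hml : 1 ≤ ml) :
    textDump_alt (b :: rest) ml
      = pvLine ((b :: rest).take 64) ++ tailRender ((b :: rest).drop 64) (ml - 1) := by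
  rw [textDump_alt, chunks_eq]
  simp only [pvChunks_cons]
  have hm : (max ml 0) = ml := by omega
  rw [hm]
  have hkt : ml.toNat = (ml - 1).toNat + 1 := by omega
  rw [hkt]
  simp only [List.map_cons, List.take_succ_cons]
  rw [pyjoin_cons, tailRender]
  have htk : ((pvChunks ((b :: rest).drop 64)).map pvLine).take (ml - 1).toNat
      = ((pvChunks ((b :: rest).drop 64)).take (ml - 1).toNat).map pvLine := by
    rw [List.map_take]
  rw [htk, List.map_map]
  have hcomp : ((fun s => "\n" ++ s) ∘ pvLine) = (fun c => "\n" ++ pvLine c) := rfl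
  rw [hcomp]
  have hmm : max (ml - 1) 0 = ml - 1 := by omega
  by_cases hc : (((pvChunks ((b :: rest).drop 64)).length : Int) > ml - 1)
  · have hcL : ((((b :: rest.take 63) :: pvChunks ((b :: rest).drop 64)).length : Int) > ml) := by
      simp only [List.length_cons]; push_cast; omega
    have hcR : (((pvChunks ((b :: rest).drop 64)).length : Int) > max (ml - 1) 0) := by
      rw [hmm]; exact hc
    rw [if_pos hcL, if_pos hcR]
    simp [String.append_assoc]
  · have hcL : ¬ ((((b :: rest.take 63) :: pvChunks ((b :: rest).drop 64)).length : Int) > ml) := by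
      simp only [List.length_cons]; push_cast; omega
    have hcR : ¬ (((pvChunks ((b :: rest).drop 64)).length : Int) > max (ml - 1) 0) := by
      rw [hmm]; exact hc
    rw [if_neg hcL, if_neg hcR]
    simp

-- joint induction: A's loop mid-chunk (c chars to the next boundary) reaches loopC
theorem loop_to_loopC :
    ∀ n (xs : List Int), xs.length ≤ n →
      ∀ (c : Nat) (i : Nat) (o : String) (lc ml : Int),
        1 ≤ c → c ≤ 63 → i % 64 = 64 - c →
        textDumpLoop xs i o lc ml = loopC (xs.drop c) (o ++ pvLine (xs.take c)) lc ml := by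
  intro n
  induction n with
  | zero =>
    intro xs hx c i o lc ml h1 h2 hi
    have : xs = [] := by
      cases xs with
      | nil => rfl
      | cons a t => simp at hx
    subst this
    rw [textDumpLoop, loopC]
    simp [pvLine_nil]
  | succ n ih =>
    intro xs hx c i o lc ml h1 h2 hi
    cases xs with
    | nil =>
      rw [textDumpLoop, loopC]
      simp [pvLine_nil]
    | cons b rest =>
      have hne : ¬ (i % 64 = 0) := by omega
      rw [textDumpLoop]
      simp only [hne, if_false]
      by_cases hc1 : c = 1
      · -- next index is a boundary
        subst hc1
        have hbound : (i + 1) % 64 = 0 := by omega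
        -- unfold one more step of the loop at the boundary, matching loopC on rest
        have key : textDumpLoop rest (i + 1) (o ++ pvChr b) lc ml
            = loopC rest (o ++ pvChr b) lc ml := by
          cases rest with
          | nil => rw [textDumpLoop, loopC]; simp
          | cons b' rest' =>
            rw [textDumpLoop, loopC]
            simp only [hbound, if_true, reduceCtorEq, if_false]
            by_cases hlc : lc ≥ ml
            · simp [hlc]
            · simp only [hlc, if_false]
              have hpos : i + 1 > 0 := by omega
              simp only [hpos, if_true]
              have hrest' : rest'.length ≤ n := by simp at hx; omega
              rw [ih rest' hrest' 63 (i + 2) _ _ ml (by omega) (by omega) (by omega)]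
              have hdrop : (b' :: rest').drop 64 = rest'.drop 63 := by simp
              have htake : (b' :: rest').take 64 = b' :: rest'.take 63 := by simp
              rw [hdrop, htake, pvLine_cons]
              congr 1
              simp [String.append_assoc]
        rw [key]
        simp [pvLine_cons, pvLine_nil]
      · -- still mid-chunk
        have hrest : rest.length ≤ n := by simp at hx; omega
        rw [ih rest hrest (c - 1) (i + 1) _ _ ml (by omega) (by omega) (by omega)]
        have hdrop : (b :: rest).drop c = rest.drop (c - 1) := by
          cases c with
          | zero => omega
          | succ c' => simp
        have htake : (b :: rest).take c = b :: rest.take (c - 1) := by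
          cases c with
          | zero => omega
          | succ c' => simp
        rw [hdrop, htake, pvLine_cons]
        congr 1
        simp [String.append_assoc]

-- loopC renders the remaining chunks
theorem loopC_eq_tailRender :
    ∀ n (ys : List Int), ys.length ≤ n → ∀ (o : String) (lc ml : Int),
      loopC ys o lc ml = o ++ tailRender ys (ml - lc) := by
  intro n
  induction n with
  | zero =>
    intro ys hy o lc ml
    have : ys = [] := by
      cases ys with
      | nil => rfl
      | cons a t => simp at hy
    subst this
    rw [loopC, tailRender_nil]
    simp
  | succ n ih =>
    intro ys hy o lc ml
    cases ys with
    | nil =>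
      rw [loopC, tailRender_nil]
      simp
    | cons b rest =>
      rw [loopC]
      simp only [reduceCtorEq, if_false]
      by_cases hlc : lc ≥ ml
      · simp only [hlc, if_true]
        rw [tailRender_trunc b rest _ (by omega)]
      · simp only [hlc, if_false]
        have hlen : ((b :: rest).drop 64).length ≤ n := by
          simp only [List.length_drop, List.length_cons]
          simp only [List.length_cons] at hy
          omega
        rw [ih _ hlen]
        rw [tailRender_step b rest _ (by omega)]
        have h1 : ml - lc - 1 = ml - (lc + 1) := by omega
        rw [h1]
        simp [String.append_assoc]

theorem textDump_eq (raw : List Int) (ml : Int) : textDump raw ml = textDump_alt raw ml := by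
  cases raw with
  | nil =>
    rw [textDump, textDumpLoop, alt_nil]
  | cons b rest =>
    rw [textDump, textDumpLoop]
    simp only [Nat.zero_mod, if_true, gt_iff_lt, lt_self_iff_false, if_false]
    by_cases hml : (0 : Int) ≥ ml
    · -- immediate truncation
      simp only [hml, if_true]
      rw [alt_trunc b rest ml (by omega)]
      simp
    · simp only [hml, if_false]
      rw [loop_to_loopC (rest.length) rest (le_refl _) 63 1 _ _ ml (by omega) (by omega) (by omega)]
      rw [loopC_eq_tailRender ((rest.drop 63).length) _ (le_refl _)]
      rw [alt_step b rest ml (by omega)]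
      have hdrop : rest.drop 63 = (b :: rest).drop 64 := by simp
      have htake : (b :: rest).take 64 = b :: rest.take 63 := by simp
      rw [hdrop, htake, pvLine_cons]
      simp [String.append_assoc]

-- ===== VERDICT (by name: the statement is the Claim_ definition above) =====
theorem textDump_spec : Claim_equal_textDump := by
  intro raw ml _
  unfold Spec_textDump
  exact textDump_eq raw ml
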